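-- pv_equiv track=rewrite | github.com/yousuf-git/theory_of_automata | implementations/alphabet.py | is_valid_alphabet
-- ===== SOURCE A (Python) =====
-- def is_valid_alphabet(alphabet):
--     if len(alphabet) == 0:
--         return False
--
--     # Step 2: Check prefix relationships
--     for i in range(len(alphabet) - 1):
--         currToken = alphabet[i]                 # Grab the current token
--         for j in range(i+1, len(alphabet)):     # Check with all the tokens after the current token
--             nextToken = alphabet[j]             # Grab the next token
--             if nextToken.startswith(currToken):         # Check for prefix relationship
--                 return False                    # currToken is a prefix of nextToken
--
--     return True
-- ===== SOURCE B (Python) =====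
-- def is_valid_alphabet(alphabet):
--     if not alphabet:
--         return False
--     seen = set()
--     for token in alphabet:
--         for k in range(len(token) + 1):
--             if token[:k] in seen:
--                 return False
--         seen.add(token)
--     return True
-- ===== Notes on version B (the rewrite author's own statement) =====
-- stated objective: faster
-- what changed: Replaced A's nested scan over all later tokens (startswith on every pair) by a single pass that keeps a set of the tokens seen so far and tests each token's prefixes for membership in that set.
import Mathlib
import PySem

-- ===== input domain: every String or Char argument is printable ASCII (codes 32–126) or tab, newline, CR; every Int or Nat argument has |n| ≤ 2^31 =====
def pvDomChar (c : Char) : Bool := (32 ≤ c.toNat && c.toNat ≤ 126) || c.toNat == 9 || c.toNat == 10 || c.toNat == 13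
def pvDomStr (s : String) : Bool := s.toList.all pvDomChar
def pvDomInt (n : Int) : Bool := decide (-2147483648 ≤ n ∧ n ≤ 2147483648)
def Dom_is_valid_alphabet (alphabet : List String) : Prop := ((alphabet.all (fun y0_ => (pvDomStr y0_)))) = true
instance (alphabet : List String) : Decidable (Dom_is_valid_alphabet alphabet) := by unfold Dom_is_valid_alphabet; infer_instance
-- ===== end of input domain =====

-- B replaces A's quadratic all-later-pairs scan by one pass that checks each token's prefixes against a set of the earlier tokens (objective: faster for large alphabets of short tokens).

-- ===== PORT A =====
-- inner loop: for j in range(i+1, len): if alphabet[j].startswith(currToken): return False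
def pvA_inner (currToken : String) : List String → Bool
  | [] => false
  | nextToken :: rest =>
    if PySem.Str.startswith nextToken currToken then true else pvA_inner currToken rest

-- outer loop over i (the suffix after position i is the j-range)
def pvA_outer : List String → Bool
  | [] => true
  | currToken :: rest =>
    if pvA_inner currToken rest then false else pvA_outer rest

def is_valid_alphabet (alphabet : List String) : Bool :=
  if alphabet.length == 0 then false else pvA_outer alphabet

-- ===== PORT B =====
-- for k in range(len(token)+1): if token[:k] in seen: return False
def pvB_hit (seen : PySem.Set String) (token : String) : Bool :=
  (PySem.List.pyRange 0 (PySem.Str.len token + 1) 1).any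
    (fun k => PySem.Set.contains seen (PySem.Str.slice token none (some k)))

-- for token in alphabet: …; seen.add(token)
def pvB_loop (seen : PySem.Set String) : List String → Bool
  | [] => true
  | token :: rest =>
    if pvB_hit seen token then false else pvB_loop (PySem.Set.add seen token) rest

def is_valid_alphabet_alt (alphabet : List String) : Bool :=
  if alphabet.isEmpty then false else pvB_loop PySem.Set.empty alphabet

-- ===== PRECONDITION & SPEC =====
def Spec_is_valid_alphabet (alphabet : List String) (out : Bool) : Prop := out = is_valid_alphabet_alt alphabet
instance (alphabet : List String) (out : Bool) : Decidable (Spec_is_valid_alphabet alphabet out) := by unfold Spec_is_valid_alphabet; infer_instance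

-- ===== CLAIM (what is proved, stated in full; the proofs are below) =====
def Claim_equal_is_valid_alphabet : Prop := ∀ (alphabet : List String), Dom_is_valid_alphabet alphabet → Spec_is_valid_alphabet alphabet (is_valid_alphabet alphabet)

-- ===== LEMMAS AND PROOFS =====

theorem pvA_inner_eq_any (c : String) (l : List String) :
    pvA_inner c l = l.any (fun t => PySem.Str.startswith t c) := by
  induction l with
  | nil => rfl
  | cons t rest ih =>
    by_cases h : PySem.Str.startswith t c = true <;> simp [pvA_inner, ih]

theorem pv_startswith_self (t : String) : PySem.Str.startswith t t = true := by
  simp [PySem.Chars.startswith_iff]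

-- B's prefix-enumeration hit test equals "some element of seen is a prefix of token".
theorem pvB_hit_iff (S : PySem.Set String) (t : String) :
    pvB_hit S t = true ↔ ∃ s ∈ S, PySem.Str.startswith t s = true := by
  unfold pvB_hit
  simp only [List.any_eq_true, PySem.List.mem_pyRange_one, PySem.Set.contains_iff]
  constructor
  · rintro ⟨k, ⟨hk0, _⟩, hmem⟩
    refine ⟨PySem.Str.slice t none (some k), hmem, ?_⟩
    simp only [PySem.Str.startswith_eq, PySem.Chars.startswith_iff, PySem.Str.toList_slice,
      PySem.Chars.slice_eq_listSlice, PySem.List.slice_to _ hk0]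
    exact List.take_prefix _ _
  · rintro ⟨s, hs, hsw⟩
    simp only [PySem.Str.startswith_eq, PySem.Chars.startswith_iff] at hsw
    refine ⟨(s.toList.length : Int), ⟨by positivity, ?_⟩, ?_⟩
    · have := hsw.length_le
      simp only [PySem.Str.len_eq]
      omega
    · have hslice : (PySem.Str.slice t none (some (s.toList.length : Int))).toList = s.toList := by
        simp only [PySem.Str.toList_slice, PySem.Chars.slice_eq_listSlice,
          PySem.List.slice_to_natCast]
        exact (List.prefix_iff_eq_take.mp hsw).symm
      have : PySem.Str.slice t none (some (s.toList.length : Int)) = s :=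
        String.toList_inj.mp hslice
      rw [this]; exact hs

theorem pvB_loop_iff (l : List String) (S : PySem.Set String) :
    pvB_loop S l = true ↔
      ((∀ t ∈ l, ∀ s ∈ S, ¬ PySem.Str.startswith t s = true) ∧ pvA_outer l = true) := by
  induction l generalizing S with
  | nil => simp [pvB_loop, pvA_outer]
  | cons t rest ih =>
    by_cases hhit : pvB_hit S t = true
    · obtain ⟨s, hs, hsw⟩ := (pvB_hit_iff S t).mp hhit
      simp only [pvB_loop, hhit, if_true]
      constructor
      · intro h; cases h
      · rintro ⟨hno, -⟩
        exact absurd hsw (hno t (List.mem_cons_self) s hs)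
    · have hno : ∀ s ∈ S, ¬ PySem.Str.startswith t s = true := by
        intro s hs hsw
        exact hhit ((pvB_hit_iff S t).mpr ⟨s, hs, hsw⟩)
      have hmem : t ∉ S := fun hm => hno t hm (pv_startswith_self t)
      have hadd : PySem.Set.add S t = S ++ [t] := by
        simp [PySem.Set.add, hmem]
      have hBstep : pvB_loop S (t :: rest) = pvB_loop (S ++ [t]) rest := by
        simp [pvB_loop, hhit, hadd]
      have hAstep : pvA_outer (t :: rest) = true ↔
          ((rest.any fun u => PySem.Str.startswith u t) = false ∧ pvA_outer rest = true) := by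
        show (if pvA_inner t rest then false else pvA_outer rest) = true ↔ _
        rw [pvA_inner_eq_any]
        by_cases hin : (rest.any fun u => PySem.Str.startswith u t) = true <;>
          simp only [hin, Bool.false_eq_true, if_true, if_false] <;> simp
      rw [hBstep, ih, hAstep]
      simp only [List.mem_append, List.mem_cons, List.any_eq_false]
      constructor
      · rintro ⟨h1, h2⟩
        refine ⟨?_, ?_, h2⟩
        · rintro u (rfl | hu) s hs
          · exact hno s hs
          · exact h1 u hu s (Or.inl hs)
        · intro u hu
          simpa using h1 u hu t (Or.inr (Or.inl rfl))
      · rintro ⟨h1, h2, h3⟩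
        refine ⟨?_, h3⟩
        rintro u hu s (hs | rfl | h)
        · exact h1 u (Or.inr hu) s hs
        · simpa using h2 u hu
        · cases h

-- ===== VERDICT (by name: the statement is the Claim_ definition above) =====
theorem is_valid_alphabet_spec : Claim_equal_is_valid_alphabet := by
  intro alphabet _
  unfold Spec_is_valid_alphabet is_valid_alphabet is_valid_alphabet_alt
  cases alphabet with
  | nil => rfl
  | cons t rest =>
    simp only [show ((t :: rest).length == 0) = false by simp,
      show (t :: rest).isEmpty = false by simp, Bool.false_eq_true, if_false]
    rw [Bool.eq_iff_iff, pvB_loop_iff]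
    constructor
    · intro h
      refine ⟨?_, h⟩
      intro u _ s hs; cases hs
    · rintro ⟨-, h⟩; exact h
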